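-- pv_equiv track=rewrite | github.com/adamjhawley/lectureNotes | moduleCompiler/main.py | decrease_level_of_section
-- ===== SOURCE A (Python) =====
-- def decrease_level_of_section(contents):
--     toBeSubbed = []
--     toBePara = []
--     for lineNumber, line in enumerate(contents):
--         if line[:14] == "\\subsubsection":
--             toBePara.append((lineNumber, line[14:]))
--         if line[:9] == "\\section{":
--             toBeSubbed.append((lineNumber, line))
--         elif line[:4] == "\\sub":
--             toBeSubbed.append((lineNumber, line))
--
--     for i in toBeSubbed:
--         contents[i[0]] = "\\sub" + i[1][1:]
--
--     for i in toBePara: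
--         contents[i[0]] = "\\paragraph" + i[1]
--
--     return contents
-- ===== SOURCE B (Python) =====
-- def decrease_level_of_section(contents):
--     for i, line in enumerate(contents):
--         if line[:14] == "\\subsubsection":
--             contents[i] = "\\paragraph" + line[14:]
--         elif line[:9] == "\\section{":
--             contents[i] = "\\sub" + line[1:]
--         elif line[:4] == "\\sub":
--             contents[i] = "\\sub" + line[1:]
--     return contents
-- ===== Notes on version B (the rewrite author's own statement) =====
-- stated objective: simpler
-- what changed: Replaces A's three passes (collect toBeSubbed/toBePara worklists, then two index-rewrite loops) with a single enumerate loop rewriting each line in place via one if/elif chain, exploiting that the paragraph rewrite always overwrites the sub rewrite on \subsubsection lines.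
import Mathlib
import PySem

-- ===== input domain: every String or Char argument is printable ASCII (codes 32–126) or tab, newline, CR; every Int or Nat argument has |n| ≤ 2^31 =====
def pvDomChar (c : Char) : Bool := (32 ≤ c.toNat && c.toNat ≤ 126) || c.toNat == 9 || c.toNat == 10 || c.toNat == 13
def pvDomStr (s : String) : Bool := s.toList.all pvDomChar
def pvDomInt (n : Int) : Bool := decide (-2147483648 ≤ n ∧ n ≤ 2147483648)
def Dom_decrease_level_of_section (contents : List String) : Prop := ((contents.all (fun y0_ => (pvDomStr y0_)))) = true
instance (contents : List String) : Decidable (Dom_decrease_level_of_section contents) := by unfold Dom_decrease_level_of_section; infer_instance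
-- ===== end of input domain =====

-- B replaces A's three passes (collect two worklists, then rewrite by index twice)
-- with one in-place pass using a single if/elif chain; objective: simpler.
-- Both A and B mutate the Python list in place; the equivalence proved is about the return value.

-- ===== PORT A =====
-- one pass over enumerate(contents) building (toBeSubbed, toBePara) in order
def pvScanA (off : Nat) : List String → List (Nat × String) × List (Nat × String)
  | [] => ([], [])
  | line :: ls =>
    let rest := pvScanA (off + 1) ls
    let para := (if PySem.Str.slice line none (some 14) == "\\subsubsection"
                 then [(off, PySem.Str.slice line (some 14) none)] else []) ++ rest.2
    let subbed := (if PySem.Str.slice line none (some 9) == "\\section{"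
                   then [(off, line)]
                   else if PySem.Str.slice line none (some 4) == "\\sub"
                   then [(off, line)] else []) ++ rest.1
    (subbed, para)

def decrease_level_of_section (contents : List String) : List String :=
  let sp := pvScanA 0 contents
  let contents1 := sp.1.foldl (fun cs i => cs.set i.1 ("\\sub" ++ PySem.Str.slice i.2 (some 1) none)) contents
  sp.2.foldl (fun cs i => cs.set i.1 ("\\paragraph" ++ i.2)) contents1

-- ===== PORT B =====
-- single pass, each line rewritten independently by the if/elif chain
def decrease_level_of_section_alt (contents : List String) : List String :=
  contents.map (fun line =>
    if PySem.Str.slice line none (some 14) == "\\subsubsection" then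
      "\\paragraph" ++ PySem.Str.slice line (some 14) none
    else if PySem.Str.slice line none (some 9) == "\\section{" then
      "\\sub" ++ PySem.Str.slice line (some 1) none
    else if PySem.Str.slice line none (some 4) == "\\sub" then
      "\\sub" ++ PySem.Str.slice line (some 1) none
    else line)

-- ===== PRECONDITION & SPEC =====
def Spec_decrease_level_of_section (contents : List String) (out : List String) : Prop := out = decrease_level_of_section_alt contents
instance (contents : List String) (out : List String) : Decidable (Spec_decrease_level_of_section contents out) := by unfold Spec_decrease_level_of_section; infer_instance

-- ===== CLAIM (what is proved, stated in full; the proofs are below) =====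
def Claim_equal_decrease_level_of_section : Prop := ∀ (contents : List String), Dom_decrease_level_of_section contents → Spec_decrease_level_of_section contents (decrease_level_of_section contents)

-- ===== LEMMAS AND PROOFS =====

-- shifting all indices of the scan by one
theorem pvScanA_shift (ls : List String) (off : Nat) :
    pvScanA (off + 1) ls =
      (((pvScanA off ls).1.map (fun p => (p.1 + 1, p.2))),
       ((pvScanA off ls).2.map (fun p => (p.1 + 1, p.2)))) := by
  induction ls generalizing off with
  | nil => simp [pvScanA]
  | cons x xs ih =>
    simp only [pvScanA, ih (off + 1), ih off]
    split_ifs <;> simp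

-- the sub-rewrite fold with all indices shifted by one leaves the head alone
theorem pvFoldSub_shift (pairs : List (Nat × String)) (x : String) (L : List String) :
    (pairs.map (fun p => (p.1 + 1, p.2))).foldl
        (fun cs i => cs.set i.1 ("\\sub" ++ PySem.Str.slice i.2 (some 1) none)) (x :: L)
      = x :: pairs.foldl
        (fun cs i => cs.set i.1 ("\\sub" ++ PySem.Str.slice i.2 (some 1) none)) L := by
  induction pairs generalizing L with
  | nil => rfl
  | cons p ps ih => simp [List.foldl_cons, List.set, ih]

-- the paragraph-rewrite fold with all indices shifted by one leaves the head alone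
theorem pvFoldPara_shift (pairs : List (Nat × String)) (x : String) (L : List String) :
    (pairs.map (fun p => (p.1 + 1, p.2))).foldl
        (fun cs i => cs.set i.1 ("\\paragraph" ++ i.2)) (x :: L)
      = x :: pairs.foldl
        (fun cs i => cs.set i.1 ("\\paragraph" ++ i.2)) L := by
  induction pairs generalizing L with
  | nil => rfl
  | cons p ps ih => simp [List.foldl_cons, List.set, ih]

theorem pv_main (contents : List String) :
    decrease_level_of_section contents = decrease_level_of_section_alt contents := by
  induction contents with
  | nil => rfl
  | cons x xs ih =>
    simp only [decrease_level_of_section, decrease_level_of_section_alt, List.map] at *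
    simp only [pvScanA, pvScanA_shift xs 0]
    split_ifs <;>
      simp_all [List.foldl_cons, List.set, pvFoldSub_shift, pvFoldPara_shift]

-- ===== VERDICT (by name: the statement is the Claim_ definition above) =====
theorem decrease_level_of_section_spec : Claim_equal_decrease_level_of_section := by
  intro contents _
  exact pv_main contents
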